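-- pv_equiv track=rewrite | github.com/WonJoonoThomasChoi/CodingChallenge_Python | CodeWar/MessageValidator.py | is_a_valid_message
-- ===== SOURCE A (Python) =====
-- def is_a_valid_message(message):
--     nums="1234567890"
--     if message=="" :
--         return True
--     if message[0] not in nums:
--         return False
--     tleng="0"
--     chars=""
--     for i in range(len(message)):
--         if message[i] in nums:
--             if chars=="":
--                 tleng+=message[i]
--             else:
--                 if int(tleng)!=len(chars):
--                     return False
--                 else:
--                     tleng=message[i]
--                     chars=""
--         else:
--             chars+=message[i]
--     return int(tleng)==len(chars)
-- ===== SOURCE B (Python) =====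
-- def is_a_valid_message(message):
--     digits = set("1234567890")
--     if message == "":
--         return True
--     if message[0] not in digits:
--         return False
--     # tokenize into maximal runs of digits / non-digits
--     tokens = []
--     rest = message
--     while rest:
--         d = rest[0] in digits
--         j = 1
--         while j < len(rest) and (rest[j] in digits) == d:
--             j += 1
--         tokens.append(rest[:j])
--         rest = rest[j:]
--     # tokens alternate digit-run, char-run, starting with a digit-run
--     k = 0
--     while k < len(tokens):
--         run = tokens[k + 1] if k + 1 < len(tokens) else ""
--         if int(tokens[k]) != len(run):
--             return False
--         k += 2
--     return True
-- ===== Notes on version B (the rewrite author's own statement) =====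
-- stated objective: alternative
-- what changed: Replaces A's single-pass streaming state machine (accumulating tleng/chars strings with in-loop resets) by a tokenize-then-validate design: split the message into maximal digit/non-digit runs, then check each digit token against the length of the following run (empty if absent).
import Mathlib
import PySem

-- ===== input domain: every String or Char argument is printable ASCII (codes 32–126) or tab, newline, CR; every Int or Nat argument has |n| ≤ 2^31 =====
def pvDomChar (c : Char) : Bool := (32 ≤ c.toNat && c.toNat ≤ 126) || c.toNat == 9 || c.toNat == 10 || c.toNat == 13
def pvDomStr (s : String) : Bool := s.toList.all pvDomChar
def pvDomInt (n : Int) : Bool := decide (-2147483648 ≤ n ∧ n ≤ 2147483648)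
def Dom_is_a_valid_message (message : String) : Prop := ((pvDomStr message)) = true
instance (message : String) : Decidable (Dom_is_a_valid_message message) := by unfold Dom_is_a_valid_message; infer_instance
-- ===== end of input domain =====

-- B re-implements A's streaming state machine as tokenize-then-validate; no speed claim (both O(n)).

-- shared helper: membership in the literal digit string "1234567890" ('c in nums')
def isDigitCh (c : Char) : Bool := ("1234567890".toList).contains c

-- shared helper: int(s) on a digit-only string (both programs only call int on digit runs)
def digitsToNat (cs : List Char) : Nat := cs.foldl (fun n c => 10 * n + (c.toNat - 48)) 0

-- ===== PORT A =====
-- the for-loop over message[i] with state (tleng, chars); early 'return False' = false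
def loopA : List Char → List Char → List Char → Bool
  | [], tleng, chars => digitsToNat tleng == chars.length
  | c :: rest, tleng, chars =>
    if isDigitCh c then
      if chars = [] then loopA rest (tleng ++ [c]) chars
      else if digitsToNat tleng ≠ chars.length then false
      else loopA rest [c] []
    else loopA rest tleng (chars ++ [c])

def is_a_valid_message (message : String) : Bool :=
  match message.toList with
  | [] => true
  | c :: rest => if !isDigitCh c then false else loopA (c :: rest) ['0'] []

-- ===== PORT B =====
-- split into maximal runs of the same class (digit / non-digit)
def tokenize : List Char → List (List Char)
  | [] => []
  | c :: rest =>
    (c :: rest.takeWhile (fun d => isDigitCh d == isDigitCh c)) ::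
      tokenize (rest.dropWhile (fun d => isDigitCh d == isDigitCh c))
  termination_by cs => cs.length
  decreasing_by
    simp only [List.length_cons]
    exact Nat.lt_succ_of_le (List.length_dropWhile_le _ _)

-- step through the tokens two at a time: digit token, then its (possibly missing) run
def checkPairs : List (List Char) → Bool
  | [] => true
  | [d] => digitsToNat d == 0
  | d :: r :: rest => (digitsToNat d == r.length) && checkPairs rest

def is_a_valid_message_alt (message : String) : Bool :=
  match message.toList with
  | [] => true
  | c :: rest => if !isDigitCh c then false else checkPairs (tokenize (c :: rest))

-- ===== PRECONDITION & SPEC =====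
def Spec_is_a_valid_message (message : String) (out : Bool) : Prop := out = is_a_valid_message_alt message
instance (message : String) (out : Bool) : Decidable (Spec_is_a_valid_message message out) := by unfold Spec_is_a_valid_message; infer_instance

-- ===== CLAIM (what is proved, stated in full; the proofs are below) =====
def Claim_equal_is_a_valid_message : Prop := ∀ (message : String), Dom_is_a_valid_message message → Spec_is_a_valid_message message (is_a_valid_message message)

-- ===== LEMMAS AND PROOFS =====

-- 'virtual token list' seen by A while it is still accumulating the digit run t
def glue (t : List Char) (cs : List Char) : List (List Char) :=
  match tokenize cs with
  | [] => [t]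
  | tok :: toks => if isDigitCh (tok.headD ' ') then (t ++ tok) :: toks else t :: tok :: toks

-- 'virtual token list' seen by A while accumulating the char run ch after digit run t
def glue2 (t ch : List Char) (cs : List Char) : List (List Char) :=
  match tokenize cs with
  | [] => [t, ch]
  | tok :: toks => if isDigitCh (tok.headD ' ') then t :: ch :: tok :: toks else t :: (ch ++ tok) :: toks

theorem tokenize_nil : tokenize [] = [] := by rw [tokenize]

theorem tokenize_cons (c : Char) (rest : List Char) :
    tokenize (c :: rest) =
      (c :: rest.takeWhile (fun d => isDigitCh d == isDigitCh c)) ::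
        tokenize (rest.dropWhile (fun d => isDigitCh d == isDigitCh c)) := by
  rw [tokenize]

theorem glue_cons_digit (t : List Char) (c : Char) (rest : List Char) (hc : isDigitCh c = true) :
    glue t (c :: rest) = glue (t ++ [c]) rest := by
  cases rest with
  | nil => simp [glue, tokenize_cons, tokenize_nil, hc]
  | cons r rest' =>
    by_cases hr : isDigitCh r = true
    · simp [glue, tokenize_cons, hc, hr, List.takeWhile, List.dropWhile]
    · simp only [Bool.not_eq_true] at hr
      simp [glue, tokenize_cons, hc, hr, List.takeWhile, List.dropWhile]

theorem glue_cons_nondigit (t : List Char) (c : Char) (rest : List Char) (hc : isDigitCh c = false) :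
    glue t (c :: rest) = glue2 t [c] rest := by
  cases rest with
  | nil => simp [glue, glue2, tokenize_cons, tokenize_nil, hc]
  | cons r rest' =>
    by_cases hr : isDigitCh r = true
    · simp [glue, glue2, tokenize_cons, hc, hr, List.takeWhile, List.dropWhile]
    · simp only [Bool.not_eq_true] at hr
      simp [glue, glue2, tokenize_cons, hc, hr, List.takeWhile, List.dropWhile]

theorem glue2_cons_nondigit (t ch : List Char) (c : Char) (rest : List Char)
    (hc : isDigitCh c = false) :
    glue2 t ch (c :: rest) = glue2 t (ch ++ [c]) rest := by
  cases rest with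
  | nil => simp [glue2, tokenize_cons, tokenize_nil, hc]
  | cons r rest' =>
    by_cases hr : isDigitCh r = true
    · simp [glue2, tokenize_cons, hc, hr, List.takeWhile, List.dropWhile]
    · simp only [Bool.not_eq_true] at hr
      simp [glue2, tokenize_cons, hc, hr, List.takeWhile, List.dropWhile]

theorem glue2_cons_digit (t ch : List Char) (c : Char) (rest : List Char)
    (hc : isDigitCh c = true) :
    glue2 t ch (c :: rest) = t :: ch :: glue [c] rest := by
  have h1 : glue [c] rest = glue ([] ++ [c]) rest := by simp
  rw [h1, ← glue_cons_digit [] c rest hc]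
  cases rest with
  | nil => simp [glue, glue2, tokenize_cons, tokenize_nil, hc]
  | cons r rest' =>
    by_cases hr : isDigitCh r = true
    · simp [glue, glue2, tokenize_cons, hc, hr, List.takeWhile, List.dropWhile]
    · simp only [Bool.not_eq_true] at hr
      simp [glue, glue2, tokenize_cons, hc, hr, List.takeWhile, List.dropWhile]

-- A's loop equals B's pair check over the virtual token lists, in both loop phases
theorem combo : ∀ (n : Nat) (cs : List Char), cs.length ≤ n →
    (∀ t, loopA cs t [] = checkPairs (glue t cs)) ∧
    (∀ t ch, ch ≠ [] → loopA cs t ch = checkPairs (glue2 t ch cs)) := by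
  intro n
  induction n with
  | zero =>
    intro cs hcs
    have : cs = [] := List.length_eq_zero_iff.mp (Nat.le_zero.mp hcs)
    subst this
    constructor
    · intro t; simp [loopA, glue, tokenize_nil, checkPairs]
    · intro t ch _; simp [loopA, glue2, tokenize_nil, checkPairs]
  | succ n ih =>
    intro cs hcs
    cases cs with
    | nil =>
      constructor
      · intro t; simp [loopA, glue, tokenize_nil, checkPairs]
      · intro t ch _; simp [loopA, glue2, tokenize_nil, checkPairs]
    | cons c rest =>
      have hr : rest.length ≤ n := by simpa using Nat.le_of_succ_le_succ hcs
      constructor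
      · intro t
        by_cases hc : isDigitCh c = true
        · rw [show loopA (c :: rest) t [] = loopA rest (t ++ [c]) [] by simp [loopA, hc],
            (ih rest hr).1 (t ++ [c]), glue_cons_digit t c rest hc]
        · simp only [Bool.not_eq_true] at hc
          rw [show loopA (c :: rest) t [] = loopA rest t [c] by simp [loopA, hc],
            (ih rest hr).2 t [c] (by simp), glue_cons_nondigit t c rest hc]
      · intro t ch hch
        by_cases hc : isDigitCh c = true
        · rw [glue2_cons_digit t ch c rest hc]
          have hstep : loopA (c :: rest) t ch =
              if digitsToNat t ≠ ch.length then false else loopA rest [c] [] := by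
            simp [loopA, hc, hch]
          by_cases heq : digitsToNat t = ch.length
          · rw [hstep, if_neg (by simp [heq]), (ih rest hr).1 [c]]
            simp [checkPairs, heq]
          · rw [hstep, if_pos heq]
            simp [checkPairs, heq]
        · simp only [Bool.not_eq_true] at hc
          rw [show loopA (c :: rest) t ch = loopA rest t (ch ++ [c]) by simp [loopA, hc],
            (ih rest hr).2 t (ch ++ [c]) (by simp), glue2_cons_nondigit t ch c rest hc]

theorem digitsToNat_zero_cons (d : List Char) : digitsToNat ('0' :: d) = digitsToNat d := by
  simp [digitsToNat, List.foldl]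

theorem checkPairs_zero_cons (d : List Char) (ts : List (List Char)) :
    checkPairs (('0' :: d) :: ts) = checkPairs (d :: ts) := by
  cases ts with
  | nil => simp [checkPairs, digitsToNat_zero_cons]
  | cons r ts' => simp [checkPairs, digitsToNat_zero_cons]

-- ===== VERDICT (by name: the statement is the Claim_ definition above) =====
theorem is_a_valid_message_spec : Claim_equal_is_a_valid_message := by
  intro message _
  unfold Spec_is_a_valid_message is_a_valid_message is_a_valid_message_alt
  cases hm : message.toList with
  | nil => rfl
  | cons c rest =>
    by_cases hc : isDigitCh c = true
    · simp only [hc, Bool.not_true, Bool.false_eq_true, if_false]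
      rw [(combo (c :: rest).length (c :: rest) le_rfl).1 ['0']]
      simp [glue, tokenize_cons, hc, checkPairs_zero_cons]
    · simp [hc]
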